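-- pv_equiv track=rewrite | github.com/elvis-gene/coding-practice | binarysearch.com/roomba.py | solve
-- ===== SOURCE A (Python) =====
-- def solve(moves, x, y):
--
--     # assuming a is x and b is y
--     a, b = 0, 0
--     for move in moves:
--         if move == 'NORTH':
--             b = b + 1
--         elif move == 'EAST':
--             a = a + 1
--         elif move == 'SOUTH':
--             b = b - 1
--         elif move == 'WEST':
--             a = a - 1
--         else:
--             pass
--
--     return a == x and b == y
-- ===== SOURCE B (Python) =====
-- DELTA = {'NORTH': (0, 1), 'EAST': (1, 0), 'SOUTH': (0, -1), 'WEST': (-1, 0)}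
--
-- def _disp(ms):
--     # net displacement vector of a move list, by divide and conquer:
--     # displacement is additive over concatenation, so split in half and add.
--     if len(ms) == 0:
--         return (0, 0)
--     if len(ms) == 1:
--         return DELTA.get(ms[0], (0, 0))
--     mid = len(ms) // 2
--     lx, ly = _disp(ms[:mid])
--     rx, ry = _disp(ms[mid:])
--     return (lx + rx, ly + ry)
--
-- def solve(moves, x, y):
--     return _disp(moves) == (x, y)
-- ===== Notes on version B (the rewrite author's own statement) =====
-- stated objective: alternative
-- what changed: A does one stateful left-to-right pass with a +1/-1 branch cascade; B computes the net displacement by divide-and-conquer tree recursion (map each single move to a vector via a table, split the list in halves, add the halves' vectors), correct because displacement is additive over concatenation, then compares the vector to (x, y).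
import Mathlib
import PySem

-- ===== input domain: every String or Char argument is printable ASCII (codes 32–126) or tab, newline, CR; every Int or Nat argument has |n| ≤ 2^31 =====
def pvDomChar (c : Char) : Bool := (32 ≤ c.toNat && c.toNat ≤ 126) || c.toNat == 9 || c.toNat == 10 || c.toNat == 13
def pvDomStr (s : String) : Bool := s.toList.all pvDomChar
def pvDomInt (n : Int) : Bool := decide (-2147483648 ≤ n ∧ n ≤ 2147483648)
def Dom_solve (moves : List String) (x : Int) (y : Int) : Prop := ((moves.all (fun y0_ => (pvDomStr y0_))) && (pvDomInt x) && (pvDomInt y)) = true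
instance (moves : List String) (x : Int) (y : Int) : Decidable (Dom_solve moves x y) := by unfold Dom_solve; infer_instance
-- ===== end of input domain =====

-- Header: B replaces A's stateful left-to-right +1/-1 branch cascade by a
-- divide-and-conquer computation of the net displacement vector (table lookup
-- at single moves, halves added), compared to (x, y) at the end (alternative).


-- ===== PORT A =====
-- literal transliteration of A: fold over moves with (a, b) state and the branch cascade
def solve (moves : List String) (x : Int) (y : Int) : Bool :=
  let ab := moves.foldl (fun (ab : Int × Int) move =>
    if move == "NORTH" then (ab.1, ab.2 + 1)
    else if move == "EAST" then (ab.1 + 1, ab.2)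
    else if move == "SOUTH" then (ab.1, ab.2 - 1)
    else if move == "WEST" then (ab.1 - 1, ab.2)
    else ab) (0, 0)
  decide (ab.1 = x) && decide (ab.2 = y)

-- ===== PORT B =====
-- Source B's DELTA table (a dict literal) and DELTA.get(m, (0, 0))
def pvDELTA : PySem.Dict String (Int × Int) :=
  PySem.Dict.ofList [("NORTH", (0, 1)), ("EAST", (1, 0)), ("SOUTH", (0, -1)), ("WEST", (-1, 0))]

-- Source B's _disp: divide-and-conquer net displacement (ms[:mid] / ms[mid:] are
-- take/drop since 0 ≤ mid ≤ len; ms[0] on the singleton branch is headD)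
def pvDisp (ms : List String) : Int × Int :=
  if _h0 : ms.length = 0 then (0, 0)
  else if _h1 : ms.length = 1 then pvDELTA.getD (ms.headD "") (0, 0)
  else
    let mid := ms.length / 2
    let l := pvDisp (ms.take mid)
    let r := pvDisp (ms.drop mid)
    (l.1 + r.1, l.2 + r.2)
termination_by ms.length
decreasing_by
  · simp only [List.length_take]; omega
  · simp only [List.length_drop]; omega

def solve_alt (moves : List String) (x : Int) (y : Int) : Bool :=
  pvDisp moves == (x, y)

-- ===== PRECONDITION & SPEC =====
def Spec_solve (moves : List String) (x : Int) (y : Int) (out : Bool) : Prop := out = solve_alt moves x y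
instance (moves : List String) (x : Int) (y : Int) (out : Bool) : Decidable (Spec_solve moves x y out) := by unfold Spec_solve; infer_instance

-- ===== CLAIM (what is proved, stated in full; the proofs are below) =====
def Claim_equal_solve : Prop := ∀ (moves : List String) (x : Int) (y : Int), Dom_solve moves x y → Spec_solve moves x y (solve moves x y)

-- ===== LEMMAS AND PROOFS =====

-- the common characterisation: net displacement as count differences
def pvCounts (ms : List String) : Int × Int :=
  ((ms.count "EAST" : Int) - (ms.count "WEST" : Int),
   (ms.count "NORTH" : Int) - (ms.count "SOUTH" : Int))

-- A's fold computes, from any start state, start plus the count differences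
theorem solve_fold_eq_counts (moves : List String) (a b : Int) :
    moves.foldl (fun (ab : Int × Int) move =>
      if move == "NORTH" then (ab.1, ab.2 + 1)
      else if move == "EAST" then (ab.1 + 1, ab.2)
      else if move == "SOUTH" then (ab.1, ab.2 - 1)
      else if move == "WEST" then (ab.1 - 1, ab.2)
      else ab) (a, b)
    = (a + (pvCounts moves).1, b + (pvCounts moves).2) := by
  induction moves generalizing a b with
  | nil => simp [pvCounts]
  | cons m ms ih =>
    rw [List.foldl_cons]
    by_cases h1 : m = "NORTH"
    · subst h1; simp only [beq_self_eq_true, if_true, ih]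
      simp [pvCounts, Prod.ext_iff]; omega
    · by_cases h2 : m = "EAST"
      · subst h2
        simp only [show (("EAST" == "NORTH") = false) from rfl, beq_self_eq_true,
          if_true, if_false, Bool.false_eq_true, ih]
        simp [pvCounts, Prod.ext_iff]; omega
      · by_cases h3 : m = "SOUTH"
        · subst h3
          simp only [show (("SOUTH" == "NORTH") = false) from rfl,
            show (("SOUTH" == "EAST") = false) from rfl, beq_self_eq_true,
            if_true, if_false, Bool.false_eq_true, ih]
          simp [pvCounts, Prod.ext_iff]; omega
        · by_cases h4 : m = "WEST"
          · subst h4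
            simp only [show (("WEST" == "NORTH") = false) from rfl,
              show (("WEST" == "EAST") = false) from rfl,
              show (("WEST" == "SOUTH") = false) from rfl, beq_self_eq_true,
              if_true, if_false, Bool.false_eq_true, ih]
            simp [pvCounts, Prod.ext_iff]; omega
          · have e1 : (m == "NORTH") = false := by simp [h1]
            have e2 : (m == "EAST") = false := by simp [h2]
            have e3 : (m == "SOUTH") = false := by simp [h3]
            have e4 : (m == "WEST") = false := by simp [h4]
            simp only [e1, e2, e3, e4, if_false, Bool.false_eq_true, ih]
            simp [pvCounts, h1, h2, h3, h4]

-- B's divide-and-conquer displacement equals the count differences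
theorem pvDisp_eq_counts (ms : List String) : pvDisp ms = pvCounts ms := by
  induction ms using pvDisp.induct with
  | case1 ms h0 =>
    rw [List.length_eq_zero_iff] at h0; subst h0
    simp [pvDisp, pvCounts]
  | case2 ms h0 h1 =>
    rw [List.length_eq_one_iff] at h1
    obtain ⟨m, rfl⟩ := h1
    rw [pvDisp]
    simp only [List.length_cons, List.length_nil, reduceDIte, List.headD_cons]
    have hD : pvDELTA = PySem.Dict.mk
        [("NORTH", ((0 : Int), (1 : Int))), ("EAST", (1, 0)), ("SOUTH", (0, -1)), ("WEST", (-1, 0))] := by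
      decide
    by_cases h1 : m = "NORTH"
    · subst h1; decide
    · by_cases h2 : m = "EAST"
      · subst h2; decide
      · by_cases h3 : m = "SOUTH"
        · subst h3; decide
        · by_cases h4 : m = "WEST"
          · subst h4; decide
          · rw [hD]
            simp only [PySem.Dict.getD, PySem.Dict.get?_mk_cons, beq_iff_eq]
            rw [if_neg (Ne.symm h1), if_neg (Ne.symm h2), if_neg (Ne.symm h3),
              if_neg (Ne.symm h4)]
            simp [pvCounts, List.count_cons, h1, h2, h3, h4, PySem.Dict.get?]
  | case3 ms h0 h1 mid ihl ihr =>
    rw [pvDisp, dif_neg h0, dif_neg h1]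
    show ((pvDisp (List.take (ms.length / 2) ms)).1 + (pvDisp (List.drop (ms.length / 2) ms)).1,
          (pvDisp (List.take (ms.length / 2) ms)).2 + (pvDisp (List.drop (ms.length / 2) ms)).2)
        = pvCounts ms
    simp only [show mid = ms.length / 2 from rfl] at ihl ihr
    rw [ihl, ihr]
    have hE := congrArg (fun l => (l.count "EAST" : Int)) (List.take_append_drop (ms.length / 2) ms)
    have hW := congrArg (fun l => (l.count "WEST" : Int)) (List.take_append_drop (ms.length / 2) ms)
    have hN := congrArg (fun l => (l.count "NORTH" : Int)) (List.take_append_drop (ms.length / 2) ms)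
    have hS := congrArg (fun l => (l.count "SOUTH" : Int)) (List.take_append_drop (ms.length / 2) ms)
    simp only [List.count_append, Nat.cast_add] at hE hW hN hS
    simp only [pvCounts, Prod.mk.injEq]
    omega

-- ===== VERDICT (by name: the statement is the Claim_ definition above) =====
theorem solve_spec : Claim_equal_solve := by
  intro moves x y _
  unfold Spec_solve solve solve_alt
  rw [solve_fold_eq_counts, pvDisp_eq_counts]
  rw [Bool.eq_iff_iff]
  simp [pvCounts, Prod.mk.injEq]
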